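-- pv_equiv track=rewrite | github.com/harry7435/Algorithm-solution | 프로그래머스/lv2/87390. n＾2 배열 자르기/n＾2 배열 자르기.py | solution
-- ===== SOURCE A (Python) =====
-- def solution(n, left, right):
--     answer = []
--     arr = []
--     # i행(n * i) j열을 숫자 i로 채우고 1차원으로 변형하는 것을 한 번에 수행
--     # for i in range(n):
--     #     for j in range(n):
--     #         if i >= j:
--     #             arr[n * i + j] = i + 1  # n * i + j로 변환
--     #         else: arr[n * i + j] = j + 1
--
--     # i행 = idx // n, j열 idx % n으로 치환가능
--     # i행 j열을 숫자 i로 채우고 1차원으로 변형하는 것을 한 번에 수행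
--     # left부터 right까지만 수행
--     for idx in range(left, right+1):
--         if idx // n >= idx % n:
--             arr.append(idx // n + 1)
--         else: arr.append(idx % n + 1)
--
--     answer = arr
--     return answer
-- ===== SOURCE B (Python) =====
-- def solution(n, left, right):
--     if left > right:
--         return []
--     out = []
--     r0, r1 = left // n, right // n
--     for r in range(r0, r1 + 1):
--         lo = left % n if r == r0 else 0
--         hi = right % n + 1 if r == r1 else n
--         out += [r + 1] * (min(hi, r + 1) - lo)
--         out += list(range(max(lo, r + 1) + 1, hi + 1))
--     return out
-- ===== Notes on version B (the rewrite author's own statement) =====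
-- stated objective: alternative
-- what changed: B emits the answer row by row as run-length pieces — a constant block [r+1] * (min(hi, r+1) - lo) followed by the arithmetic range(max(lo, r+1)+1, hi+1) — instead of A's single pass computing max(idx//n, idx%n)+1 for every flat index.
-- outside the precondition, e.g. on solution(-3, 0, 2): A returns [1, 0, 0], B returns []; on solution(-2, -5, -1): A returns [3, 3, 2, 2, 1], B returns []
import Mathlib
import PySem

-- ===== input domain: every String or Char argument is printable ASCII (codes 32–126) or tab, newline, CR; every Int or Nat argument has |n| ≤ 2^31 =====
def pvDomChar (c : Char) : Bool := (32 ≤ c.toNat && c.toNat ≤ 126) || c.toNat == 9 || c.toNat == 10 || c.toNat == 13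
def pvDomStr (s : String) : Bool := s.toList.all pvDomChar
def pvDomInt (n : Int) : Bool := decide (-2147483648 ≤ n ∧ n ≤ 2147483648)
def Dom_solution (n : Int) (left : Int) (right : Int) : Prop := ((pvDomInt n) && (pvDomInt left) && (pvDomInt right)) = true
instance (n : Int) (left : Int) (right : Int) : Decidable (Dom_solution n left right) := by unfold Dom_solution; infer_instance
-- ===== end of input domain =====

-- B emits the answer as per-row runs (a constant block [r+1]*k plus an arithmetic range),
-- instead of A's per-index max(idx//n, idx%n)+1 pass; alternative algorithm, same cost.


-- ===== PORT A =====
def solution (n : Int) (left : Int) (right : Int) : List Int :=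
  (PySem.List.pyRange left (right + 1) 1).foldl
    (fun arr idx =>
      if PySem.Int.floordiv idx n ≥ PySem.Int.mod idx n
      then arr ++ [PySem.Int.floordiv idx n + 1]
      else arr ++ [PySem.Int.mod idx n + 1]) []

-- ===== PORT B =====
def solution_alt (n : Int) (left : Int) (right : Int) : List Int :=
  if left > right then []
  else
    let r0 := PySem.Int.floordiv left n
    let r1 := PySem.Int.floordiv right n
    (PySem.List.pyRange r0 (r1 + 1) 1).foldl
      (fun out r =>
        let lo : Int := if r = r0 then PySem.Int.mod left n else 0
        let hi : Int := if r = r1 then PySem.Int.mod right n + 1 else n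
        out ++ List.replicate (min hi (r + 1) - lo).toNat (r + 1)
            ++ PySem.List.pyRange (max lo (r + 1) + 1) (hi + 1) 1) []

-- ===== PRECONDITION & SPEC =====
-- Pre_ restricts to the task's natural domain of a positive grid size n ≥ 1 (keeping the
-- trivially empty range right < left for any n): for n = 0 with a nonempty range A raises
-- ZeroDivisionError, and for negative n the rows B walks do not exist in an n×n grid, so A's
-- negative-floor-division values there are not matched.
def Pre_solution (n : Int) (left : Int) (right : Int) : Prop := 1 ≤ n ∨ right < left
instance (n : Int) (left : Int) (right : Int) : Decidable (Pre_solution n left right) := by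
  unfold Pre_solution; infer_instance

def pvWitness_solution : Int × Int × Int := (3, 2, 5)

def Spec_solution (n : Int) (left : Int) (right : Int) (out : List Int) : Prop := out = solution_alt n left right
instance (n : Int) (left : Int) (right : Int) (out : List Int) : Decidable (Spec_solution n left right out) := by unfold Spec_solution; infer_instance

-- ===== CLAIM (what is proved, stated in full; the proofs are below) =====
def Claim_equal_solution : Prop := ∀ (n : Int) (left : Int) (right : Int), Dom_solution n left right → Pre_solution n left right → Spec_solution n left right (solution n left right)

-- ===== LEMMAS AND PROOFS =====

-- the per-index value both programs produce
def pvVal (n idx : Int) : Int := max (PySem.Int.floordiv idx n) (PySem.Int.mod idx n) + 1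

-- A is the map of pvVal over the flat range
theorem solution_eq_map (n left right : Int) :
    solution n left right = (PySem.List.pyRange left (right + 1) 1).map (pvVal n) := by
  unfold solution
  have hstep : (fun (arr : List Int) idx =>
      if PySem.Int.floordiv idx n ≥ PySem.Int.mod idx n
      then arr ++ [PySem.Int.floordiv idx n + 1]
      else arr ++ [PySem.Int.mod idx n + 1])
      = fun (arr : List Int) idx => arr ++ [pvVal n idx] := by
    funext arr idx
    unfold pvVal
    split <;> rename_i h
    · rw [max_eq_left h]
    · rw [max_eq_right (by omega)]
  rw [hstep, PySem.List.foldl_append_singleton_eq_map, List.nil_append]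

-- floordiv/mod of q*n + c for 0 ≤ c < n
theorem fdiv_mod_mul_add (n q c : Int) (hn : 0 < n) (hc0 : 0 ≤ c) (hcn : c < n) :
    PySem.Int.floordiv (q * n + c) n = q ∧ PySem.Int.mod (q * n + c) n = c := by
  have hne : n ≠ 0 := by omega
  have hcomm : q * n + c = c + n * q := by ring
  constructor
  · rw [PySem.Int.floordiv_eq_ediv_of_pos hn, hcomm, Int.add_mul_ediv_left _ _ hne,
      Int.ediv_eq_zero_of_lt hc0 hcn]
    omega
  · rw [PySem.Int.mod_eq_emod_of_pos hn, hcomm, Int.add_mul_emod_self_left,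
      Int.emod_eq_of_lt hc0 hcn]

-- decomposition a = (a//n)*n + a%n with 0 ≤ a%n < n
theorem fdiv_mod_decomp (n a : Int) (hn : 0 < n) :
    a = PySem.Int.floordiv a n * n + PySem.Int.mod a n ∧
      0 ≤ PySem.Int.mod a n ∧ PySem.Int.mod a n < n := by
  rw [PySem.Int.floordiv_eq_ediv_of_pos hn, PySem.Int.mod_eq_emod_of_pos hn]
  refine ⟨?_, Int.emod_nonneg a (by omega), Int.emod_lt_of_pos a hn⟩
  rw [Int.emod_def]; ring

-- shifting a unit range
theorem pyRange_shift (a b k : Int) :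
    PySem.List.pyRange (k + a) (k + b) 1 = (PySem.List.pyRange a b 1).map (fun x => k + x) := by
  rw [PySem.List.pyRange_one, PySem.List.pyRange_one, List.map_map]
  have h : (k + b - (k + a)) = b - a := by ring
  rw [h]
  apply List.map_congr_left
  intro j _
  simp only [Function.comp_apply]
  ring

-- the max-map over columns below the diagonal is a constant block
theorem map_max_const (r a b : Int) (hb : b ≤ r + 1) :
    (PySem.List.pyRange a b 1).map (fun c => max r c + 1) = List.replicate (b - a).toNat (r + 1) := by
  apply List.eq_replicate_iff.mpr
  constructor
  · rw [List.length_map, PySem.List.length_pyRange_one]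
  · intro x hx
    rw [List.mem_map] at hx
    obtain ⟨c, hc, hxc⟩ := hx
    rw [PySem.List.mem_pyRange_one] at hc
    rw [← hxc, max_eq_left (by omega)]

-- the max-map over columns past the diagonal is an arithmetic range
theorem map_max_shift (r a b : Int) (ha : r ≤ a) :
    (PySem.List.pyRange a b 1).map (fun c => max r c + 1)
      = PySem.List.pyRange (a + 1) (b + 1) 1 := by
  have hcongr : (PySem.List.pyRange a b 1).map (fun c => max r c + 1)
      = (PySem.List.pyRange a b 1).map (fun c => c + 1) := by
    apply List.map_congr_left
    intro c hc
    rw [PySem.List.mem_pyRange_one] at hc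
    rw [max_eq_right (by omega)]
  rw [hcongr, PySem.List.pyRange_one, PySem.List.pyRange_one, List.map_map]
  have h : (b + 1 - (a + 1)) = b - a := by ring
  rw [h]
  apply List.map_congr_left
  intro j _
  simp only [Function.comp_apply]
  ring

-- one row's runs equal the map of pvVal over the corresponding flat indices
theorem seg_eq_map (n r lo hi : Int) (hn : 0 < n)
    (hlo : 0 ≤ lo) (hlh : lo ≤ hi) (hhi : hi ≤ n) :
    List.replicate (min hi (r + 1) - lo).toNat (r + 1)
        ++ PySem.List.pyRange (max lo (r + 1) + 1) (hi + 1) 1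
      = (PySem.List.pyRange (r * n + lo) (r * n + hi) 1).map (pvVal n) := by
  have hmain : (PySem.List.pyRange lo hi 1).map (fun c => max r c + 1)
      = List.replicate (min hi (r + 1) - lo).toNat (r + 1)
        ++ PySem.List.pyRange (max lo (r + 1) + 1) (hi + 1) 1 := by
    by_cases h1 : hi ≤ r + 1
    · rw [min_eq_left h1, max_eq_right (by omega), map_max_const r lo hi h1,
        PySem.List.pyRange_one_eq_nil (by omega), List.append_nil]
    · by_cases h2 : lo ≤ r + 1
      · rw [min_eq_right (by omega), max_eq_right h2,
          PySem.List.pyRange_one_append lo (r + 1) hi h2 (by omega), List.map_append,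
          map_max_const r lo (r + 1) le_rfl, map_max_shift r (r + 1) hi (by omega)]
      · rw [min_eq_right (by omega), max_eq_left (by omega),
          show (r + 1 - lo).toNat = 0 by omega, List.replicate_zero, List.nil_append,
          map_max_shift r lo hi (by omega)]
  rw [← hmain]
  have hshift : PySem.List.pyRange (r * n + lo) (r * n + hi) 1
      = (PySem.List.pyRange lo hi 1).map (fun x => r * n + x) := pyRange_shift lo hi (r * n)
  rw [hshift, List.map_map]
  apply List.map_congr_left
  intro c hc
  rw [PySem.List.mem_pyRange_one] at hc
  show max r c + 1 = pvVal n (r * n + c)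
  obtain ⟨hq, hm⟩ := fdiv_mod_mul_add n r c hn (by omega) (by omega)
  unfold pvVal
  rw [hq, hm]

-- flatMap congruence on members
theorem flatMap_congr_mem {α β : Type} (l : List α) (f g : α → List β)
    (h : ∀ x ∈ l, f x = g x) : l.flatMap f = l.flatMap g := by
  induction l with
  | nil => rfl
  | cons a t ih =>
    simp only [List.flatMap_cons]
    rw [h a (by simp), ih (fun x hx => h x (List.mem_cons_of_mem a hx))]

-- main row-walk lemma: B's flatMap over rows equals the flat map of pvVal
theorem rows_eq (n : Int) (hn : 0 < n) :
    ∀ (k : Nat) (left right : Int), left ≤ right →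
      (PySem.Int.floordiv right n - PySem.Int.floordiv left n).toNat = k →
      (PySem.List.pyRange (PySem.Int.floordiv left n) (PySem.Int.floordiv right n + 1) 1).flatMap
        (fun r =>
          List.replicate
              ((min (if r = PySem.Int.floordiv right n then PySem.Int.mod right n + 1 else n)
                  (r + 1))
                - (if r = PySem.Int.floordiv left n then PySem.Int.mod left n else 0)).toNat
              (r + 1)
            ++ PySem.List.pyRange
              ((max (if r = PySem.Int.floordiv left n then PySem.Int.mod left n else 0) (r + 1))
                + 1)
              ((if r = PySem.Int.floordiv right n then PySem.Int.mod right n + 1 else n) + 1) 1)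
      = (PySem.List.pyRange left (right + 1) 1).map (pvVal n) := by
  intro k
  induction k with
  | zero =>
    intro left right hlr hk
    obtain ⟨hdec, hm0, hmn⟩ := fdiv_mod_decomp n left hn
    obtain ⟨hdecr, hmr0, hmrn⟩ := fdiv_mod_decomp n right hn
    have hle : PySem.Int.floordiv left n ≤ PySem.Int.floordiv right n := by
      rw [PySem.Int.floordiv_eq_ediv_of_pos hn, PySem.Int.floordiv_eq_ediv_of_pos hn]
      exact Int.ediv_le_ediv hn hlr
    have heq : PySem.Int.floordiv right n = PySem.Int.floordiv left n := by omega
    rw [heq] at hdecr ⊢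
    rw [PySem.List.pyRange_one_singleton, List.flatMap_cons, List.flatMap_nil,
      List.append_nil, if_pos rfl, if_pos rfl]
    rw [seg_eq_map n (PySem.Int.floordiv left n) (PySem.Int.mod left n)
      (PySem.Int.mod right n + 1) hn hm0 (by omega) (by omega)]
    have h1 : PySem.Int.floordiv left n * n + PySem.Int.mod left n = left := hdec.symm
    have h2 : PySem.Int.floordiv left n * n + (PySem.Int.mod right n + 1) = right + 1 := by
      omega
    rw [h1, h2]
  | succ k ih =>
    intro left right hlr hk
    obtain ⟨hdec, hm0, hmn⟩ := fdiv_mod_decomp n left hn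
    obtain ⟨hdecr, hmr0, hmrn⟩ := fdiv_mod_decomp n right hn
    have hle : PySem.Int.floordiv left n ≤ PySem.Int.floordiv right n := by
      rw [PySem.Int.floordiv_eq_ediv_of_pos hn, PySem.Int.floordiv_eq_ediv_of_pos hn]
      exact Int.ediv_le_ediv hn hlr
    have hlt : PySem.Int.floordiv left n < PySem.Int.floordiv right n := by omega
    -- the next row boundary left' = (left//n + 1) * n
    have hq0 := fdiv_mod_mul_add n (PySem.Int.floordiv left n + 1) 0 hn le_rfl hn
    rw [add_zero] at hq0
    obtain ⟨hd0', hm0'⟩ := hq0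
    have hmulagree : (PySem.Int.floordiv left n + 1) * n = PySem.Int.floordiv left n * n + n := by
      ring
    have hl'le : (PySem.Int.floordiv left n + 1) * n ≤ right := by
      have hmul : (PySem.Int.floordiv left n + 1) * n ≤ PySem.Int.floordiv right n * n :=
        Int.mul_le_mul_of_nonneg_right (by omega) (by omega)
      omega
    have hll' : left < (PySem.Int.floordiv left n + 1) * n := by omega
    -- peel the first row
    rw [PySem.List.pyRange_one_cons (by omega), List.flatMap_cons]
    rw [if_pos rfl,
      if_neg (by omega : ¬ PySem.Int.floordiv left n = PySem.Int.floordiv right n)]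
    rw [seg_eq_map n (PySem.Int.floordiv left n) (PySem.Int.mod left n) n hn hm0
      (by omega) le_rfl]
    have h1 : PySem.Int.floordiv left n * n + PySem.Int.mod left n = left := hdec.symm
    rw [h1, ← hmulagree]
    -- the remaining rows via the induction hypothesis at left'
    have hIH := ih ((PySem.Int.floordiv left n + 1) * n) right hl'le
      (by rw [hd0']; omega)
    rw [hd0', hm0'] at hIH
    have hcong : ∀ r ∈ PySem.List.pyRange (PySem.Int.floordiv left n + 1)
          (PySem.Int.floordiv right n + 1) 1,
        (List.replicate
            ((min (if r = PySem.Int.floordiv right n then PySem.Int.mod right n + 1 else n)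
                (r + 1))
              - (if r = PySem.Int.floordiv left n then PySem.Int.mod left n else 0)).toNat
            (r + 1)
          ++ PySem.List.pyRange
            ((max (if r = PySem.Int.floordiv left n then PySem.Int.mod left n else 0) (r + 1))
              + 1)
            ((if r = PySem.Int.floordiv right n then PySem.Int.mod right n + 1 else n) + 1) 1)
        = (List.replicate
            ((min (if r = PySem.Int.floordiv right n then PySem.Int.mod right n + 1 else n)
                (r + 1))
              - (if r = PySem.Int.floordiv left n + 1 then 0 else 0)).toNat
            (r + 1)
          ++ PySem.List.pyRange
            ((max (if r = PySem.Int.floordiv left n + 1 then 0 else 0) (r + 1)) + 1)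
            ((if r = PySem.Int.floordiv right n then PySem.Int.mod right n + 1 else n) + 1) 1) := by
      intro r hr
      rw [PySem.List.mem_pyRange_one] at hr
      rw [if_neg (by omega : ¬ r = PySem.Int.floordiv left n), ite_self]
    rw [flatMap_congr_mem _ _ _ hcong, hIH, ← List.map_append,
      ← PySem.List.pyRange_one_append left ((PySem.Int.floordiv left n + 1) * n) (right + 1)
        (by omega) (by omega)]

-- ===== VERDICT (by name: the statement is the Claim_ definition above) =====
theorem solution_spec : Claim_equal_solution := by
  intro n left right _ hpre
  unfold Spec_solution
  by_cases hlr : left > right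
  · unfold solution solution_alt
    rw [if_pos hlr, PySem.List.pyRange_one_eq_nil (by omega)]
    rfl
  · have hn : 0 < n := by
      rcases hpre with h | h
      · omega
      · omega
    rw [solution_eq_map]
    unfold solution_alt
    rw [if_neg hlr]
    show List.map (pvVal n) (PySem.List.pyRange left (right + 1) 1)
      = (PySem.List.pyRange (PySem.Int.floordiv left n)
          (PySem.Int.floordiv right n + 1) 1).foldl
        (fun out r =>
          out
            ++ List.replicate
              ((min (if r = PySem.Int.floordiv right n then PySem.Int.mod right n + 1 else n)
                  (r + 1))
                - (if r = PySem.Int.floordiv left n then PySem.Int.mod left n else 0)).toNat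
              (r + 1)
            ++ PySem.List.pyRange
              ((max (if r = PySem.Int.floordiv left n then PySem.Int.mod left n else 0) (r + 1))
                + 1)
              ((if r = PySem.Int.floordiv right n then PySem.Int.mod right n + 1 else n) + 1) 1)
        []
    have hassoc : (fun (out : List Int) (r : Int) =>
        out
          ++ List.replicate
            ((min (if r = PySem.Int.floordiv right n then PySem.Int.mod right n + 1 else n)
                (r + 1))
              - (if r = PySem.Int.floordiv left n then PySem.Int.mod left n else 0)).toNat
            (r + 1)
          ++ PySem.List.pyRange
            ((max (if r = PySem.Int.floordiv left n then PySem.Int.mod left n else 0) (r + 1))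
              + 1)
            ((if r = PySem.Int.floordiv right n then PySem.Int.mod right n + 1 else n) + 1) 1)
        = fun (out : List Int) (r : Int) =>
          out ++
            (List.replicate
              ((min (if r = PySem.Int.floordiv right n then PySem.Int.mod right n + 1 else n)
                  (r + 1))
                - (if r = PySem.Int.floordiv left n then PySem.Int.mod left n else 0)).toNat
              (r + 1)
            ++ PySem.List.pyRange
              ((max (if r = PySem.Int.floordiv left n then PySem.Int.mod left n else 0) (r + 1))
                + 1)
              ((if r = PySem.Int.floordiv right n then PySem.Int.mod right n + 1 else n) + 1) 1) := by
      funext out r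
      exact List.append_assoc _ _ _
    rw [hassoc, PySem.List.foldl_append_eq_flatMap, List.nil_append]
    exact (rows_eq n hn _ left right (by omega) rfl).symm
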